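-- pv_equiv track=rewrite | github.com/Alexhuszagh/XLDiscoverer | xldlib/export/formats/skyline.py | subtract_dict
-- ===== SOURCE A (Python) =====
-- from collections import Counter, defaultdict, namedtuple
--
-- def mappedresidues(deadends):
--     '''Maps the CSV residue keys as values to each individual residue'''
--
--     mapped = defaultdict(list)
--     for key in deadends:
--         for residue in key.split(','):
--             mapped[residue].append(key)
--     return mapped
--
-- def subtract_dict(d, other):
--     '''Int subtracts a temp, abstract dict from a d'''
--
--     d = d.copy()
--     mapped = mappedresidues(d)
--
--     for residue, value in other.items():
--         keys = mapped[residue]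
--         for key in keys:
--             if d[key] > 0:
--                 d[key] -= value
--                 break
--         else:
--             d[keys[0]] -= value
--
--     return d
-- ===== SOURCE B (Python) =====
-- def subtract_dict(d, other):
--     '''Int subtracts a temp, abstract dict from a d'''
--
--     vals = dict(d)
--     for residue, value in other.items():
--         keys = [k for k in vals if residue in k.split(',')]
--         target = next((k for k in keys if vals[k] > 0), keys[0])
--         vals[target] -= value
--     return vals
-- ===== Notes on version B (the rewrite author's own statement) =====
-- stated objective: simpler
-- what changed: B drops the precomputed residue-to-keys index (mappedresidues, a defaultdict built in a separate pass) and the for/else inner loop: it recomputes the candidate keys per residue with a single list-comprehension filter over the dict and picks the target with next(..., keys[0]).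
import Mathlib
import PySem

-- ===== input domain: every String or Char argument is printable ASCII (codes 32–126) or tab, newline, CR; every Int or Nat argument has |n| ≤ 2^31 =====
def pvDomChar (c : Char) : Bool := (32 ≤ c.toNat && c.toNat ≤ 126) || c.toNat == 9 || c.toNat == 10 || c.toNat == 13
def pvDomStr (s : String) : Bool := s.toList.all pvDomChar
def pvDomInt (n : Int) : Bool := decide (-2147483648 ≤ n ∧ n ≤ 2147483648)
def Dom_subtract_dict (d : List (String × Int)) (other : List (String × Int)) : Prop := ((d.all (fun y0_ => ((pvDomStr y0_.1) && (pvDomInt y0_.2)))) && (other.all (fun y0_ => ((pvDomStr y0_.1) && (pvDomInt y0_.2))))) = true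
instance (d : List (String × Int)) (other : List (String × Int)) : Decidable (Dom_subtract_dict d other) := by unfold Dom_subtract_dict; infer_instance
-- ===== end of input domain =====

-- B drops A's precomputed residue→keys index (`mappedresidues`) and the for/else loop: it
-- recomputes the candidate keys per residue with one filter and picks the target with
-- next(...)/keys[0]; objective: simpler (no speed claim).

-- ===== PORT A =====
-- helper: maps the CSV residue keys as values to each individual residue (defaultdict(list))
def mappedresidues (deadends : List String) : PySem.Dict String (List String) :=
  deadends.foldl
    (fun m key =>
      ((PySem.Str.split? key ",").getD []).foldl
        (fun m residue => m.modify residue [] (· ++ [key])) m)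
    PySem.Dict.empty

def subtract_dict (d : List (String × Int)) (other : List (String × Int)) : List (String × Int) :=
  let dd := PySem.Dict.mk d            -- d = d.copy()
  let mapped := mappedresidues dd.keys
  (other.foldl
    (fun dd rv =>
      let keys := mapped.getD rv.1 []
      -- for key in keys: if d[key] > 0: d[key] -= value; break / else: d[keys[0]] -= value
      match keys.find? (fun k => decide (0 < dd.getD k 0)) with
      | some key => dd.insert key (dd.getD key 0 - rv.2)
      | none =>
        match keys with
        | [] => dd                      -- Python raises IndexError on keys[0]; excluded by Pre_
        | k0 :: _ => dd.insert k0 (dd.getD k0 0 - rv.2))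
    dd).items

-- ===== PORT B =====
def subtract_dict_alt (d : List (String × Int)) (other : List (String × Int)) : List (String × Int) :=
  (other.foldl
    (fun vals rv =>
      -- keys = [k for k in vals if residue in k.split(',')]
      let keys := vals.keys.filter (fun k => decide (rv.1 ∈ (PySem.Str.split? k ",").getD []))
      match keys with
      | [] => vals                      -- Python raises IndexError on keys[0]; excluded by Pre_
      | k0 :: _ =>
        -- target = next((k for k in keys if vals[k] > 0), keys[0])
        let target := (keys.find? (fun k => decide (0 < vals.getD k 0))).getD k0
        vals.insert target (vals.getD target 0 - rv.2))
    (PySem.Dict.mk d)).items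

-- ===== PRECONDITION & SPEC =====
-- Pre_ excludes (i) association lists with duplicate keys, which cannot arise from the
-- Python dict arguments, and (ii) inputs where some residue of `other` occurs in no key of
-- `d` split on ',' — there Python A raises IndexError on keys[0] (and B raises likewise).
def Pre_subtract_dict (d : List (String × Int)) (other : List (String × Int)) : Prop :=
  (d.map Prod.fst).Nodup ∧ (other.map Prod.fst).Nodup ∧
  ∀ p ∈ other, ∃ q ∈ d, p.1 ∈ (PySem.Str.split? q.1 ",").getD []
instance (d : List (String × Int)) (other : List (String × Int)) : Decidable (Pre_subtract_dict d other) := by unfold Pre_subtract_dict; infer_instance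

def pvWitness_subtract_dict : (List (String × Int)) × (List (String × Int)) :=
  ([("A,B", 2), ("C", 0)], [("B", 1), ("C", 3)])

def Spec_subtract_dict (d : List (String × Int)) (other : List (String × Int)) (out : List (String × Int)) : Prop := out = subtract_dict_alt d other
instance (d : List (String × Int)) (other : List (String × Int)) (out : List (String × Int)) : Decidable (Spec_subtract_dict d other out) := by unfold Spec_subtract_dict; infer_instance

-- ===== CLAIM (what is proved, stated in full; the proofs are below) =====
def Claim_equal_subtract_dict : Prop := ∀ (d : List (String × Int)) (other : List (String × Int)), Dom_subtract_dict d other → Pre_subtract_dict d other → Spec_subtract_dict d other (subtract_dict d other)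

-- ===== LEMMAS AND PROOFS =====

-- the two loop bodies, as named step functions (definitionally the ports' foldl bodies)
def pvStepA (mapped : PySem.Dict String (List String)) (dd : PySem.Dict String Int)
    (rv : String × Int) : PySem.Dict String Int :=
  match (mapped.getD rv.1 []).find? (fun k => decide (0 < dd.getD k 0)) with
  | some key => dd.insert key (dd.getD key 0 - rv.2)
  | none =>
    match mapped.getD rv.1 [] with
    | [] => dd
    | k0 :: _ => dd.insert k0 (dd.getD k0 0 - rv.2)

def pvStepB (vals : PySem.Dict String Int) (rv : String × Int) : PySem.Dict String Int :=
  match vals.keys.filter (fun k => decide (rv.1 ∈ (PySem.Str.split? k ",").getD [])) with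
  | [] => vals
  | k0 :: _ =>
    vals.insert
      (((vals.keys.filter (fun k => decide (rv.1 ∈ (PySem.Str.split? k ",").getD []))).find?
          (fun k => decide (0 < vals.getD k 0))).getD k0)
      (vals.getD
        (((vals.keys.filter (fun k => decide (rv.1 ∈ (PySem.Str.split? k ",").getD []))).find?
            (fun k => decide (0 < vals.getD k 0))).getD k0) 0 - rv.2)

theorem subtract_dict_eq_foldl (d other : List (String × Int)) :
    subtract_dict d other
    = (other.foldl (pvStepA (mappedresidues (PySem.Dict.mk d).keys)) (PySem.Dict.mk d)).items := rfl

theorem subtract_dict_alt_eq_foldl (d other : List (String × Int)) :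
    subtract_dict_alt d other = (other.foldl pvStepB (PySem.Dict.mk d)).items := rfl

-- the per-residue chunk of A's mapped[residue]
theorem chunk_eq_nil {q k : String} (h : q ∉ (PySem.Str.split? k ",").getD []) :
    ((PySem.Str.split? k ",").getD []).filter (fun r => r == q) = [] := by
  rw [List.filter_eq_nil_iff]
  intro r hr hrq
  exact h (eq_of_beq hrq ▸ hr)

theorem chunk_ne_nil {q k : String} (h : q ∈ (PySem.Str.split? k ",").getD []) :
    ((PySem.Str.split? k ",").getD []).filter (fun r => r == q) ≠ [] :=
  List.ne_nil_of_mem (List.mem_filter.mpr ⟨h, by simp⟩)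

-- A's mapped[residue] is the keys of `ks`, in order, each repeated once per occurrence of
-- the residue in its comma-split.
theorem mapped_getD_aux (q : String) :
    ∀ (ks : List String) (m : PySem.Dict String (List String)),
    (ks.foldl
      (fun m key =>
        ((PySem.Str.split? key ",").getD []).foldl
          (fun m residue => m.modify residue [] (· ++ [key])) m) m).getD q []
    = m.getD q [] ++
      ks.flatMap (fun k =>
        (((PySem.Str.split? k ",").getD []).filter (fun r => r == q)).map (fun _ => k)) := by
  intro ks
  induction ks with
  | nil => simp
  | cons k ks ih =>
    intro m
    rw [List.foldl_cons, List.flatMap_cons, ih]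
    have h1 : ((PySem.Str.split? k ",").getD []).foldl
        (fun m residue => m.modify residue [] (· ++ [k])) m
      = ((((PySem.Str.split? k ",").getD []).map (fun r => (r, k))).foldl
          (fun m p => m.modify p.1 [] (· ++ [p.2])) m) := by
      rw [List.foldl_map]
    rw [h1, PySem.Dict.getD_foldl_modify_append]
    rw [List.filter_map, List.map_map, List.append_assoc]
    rfl

theorem mapped_getD (ks : List String) (q : String) :
    (mappedresidues ks).getD q []
    = ks.flatMap (fun k =>
        (((PySem.Str.split? k ",").getD []).filter (fun r => r == q)).map (fun _ => k)) := by
  unfold mappedresidues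
  rw [mapped_getD_aux]
  simp

-- the repeated-keys list and the filtered-keys list have the same head? …
theorem flat_head (q : String) : ∀ (ks : List String),
    (ks.flatMap (fun k =>
        (((PySem.Str.split? k ",").getD []).filter (fun r => r == q)).map (fun _ => k))).head?
    = (ks.filter (fun k => decide (q ∈ (PySem.Str.split? k ",").getD []))).head? := by
  intro ks
  induction ks with
  | nil => rfl
  | cons k ks ih =>
    rw [List.flatMap_cons, List.head?_append, List.filter_cons]
    by_cases hq : q ∈ (PySem.Str.split? k ",").getD []
    · rw [if_pos (by simpa using hq)]
      cases hcc : ((PySem.Str.split? k ",").getD []).filter (fun r => r == q) with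
      | nil => exact absurd hcc (chunk_ne_nil hq)
      | cons r rs => simp
    · rw [chunk_eq_nil hq, if_neg (by simpa using hq)]
      simp only [List.map_nil, List.head?_nil, Option.none_or]
      exact ih

-- … and the same first element satisfying any predicate.
theorem flat_find (q : String) (p : String → Bool) : ∀ (ks : List String),
    (ks.flatMap (fun k =>
        (((PySem.Str.split? k ",").getD []).filter (fun r => r == q)).map (fun _ => k))).find? p
    = (ks.filter (fun k => decide (q ∈ (PySem.Str.split? k ",").getD []))).find? p := by
  intro ks
  induction ks with
  | nil => rfl
  | cons k ks ih =>
    rw [List.flatMap_cons, List.find?_append, List.filter_cons]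
    by_cases hq : q ∈ (PySem.Str.split? k ",").getD []
    · rw [if_pos (by simpa using hq)]
      by_cases hp : p k = true
      · cases hcc : ((PySem.Str.split? k ",").getD []).filter (fun r => r == q) with
        | nil => exact absurd hcc (chunk_ne_nil hq)
        | cons r rs => simp [hp]
      · have hnone : ((((PySem.Str.split? k ",").getD []).filter (fun r => r == q)).map
            (fun _ => k)).find? p = none := by
          rw [List.find?_eq_none]
          intro x hx
          rcases List.mem_map.mp hx with ⟨r, _, rfl⟩
          simpa using hp
        rw [hnone, List.find?_cons_of_neg hp]
        simp only [Option.none_or]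
        exact ih
    · rw [chunk_eq_nil hq, if_neg (by simpa using hq)]
      simp only [List.map_nil, List.find?_nil, Option.none_or]
      exact ih

-- B's step never changes the key list: the inserted target is an existing key
theorem keys_pvStepB (s : PySem.Dict String Int) (rv : String × Int) :
    (pvStepB s rv).keys = s.keys := by
  unfold pvStepB
  cases hc : s.keys.filter (fun k => decide (rv.1 ∈ (PySem.Str.split? k ",").getD [])) with
  | nil => rfl
  | cons k0 rest =>
    have hmem : (((k0 :: rest).find? (fun k => decide (0 < s.getD k 0))).getD k0) ∈ s.keys := by
      cases hf : (k0 :: rest).find? (fun k => decide (0 < s.getD k 0)) with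
      | some u =>
        have hu := List.mem_of_find?_eq_some hf
        rw [← hc] at hu
        simpa using List.mem_of_mem_filter hu
      | none =>
        have hk0 : k0 ∈ k0 :: rest := List.mem_cons_self
        rw [← hc] at hk0
        simpa using List.mem_of_mem_filter hk0
    exact PySem.Dict.keys_insert_of_contains s _
      ((PySem.Dict.contains_iff_mem_keys s _).mpr hmem)

-- with the original key list, one step of A equals one step of B
theorem step_eq (ks0 : List String) (s : PySem.Dict String Int) (hk : s.keys = ks0)
    (rv : String × Int) : pvStepA (mappedresidues ks0) s rv = pvStepB s rv := by
  unfold pvStepA pvStepB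
  rw [hk, mapped_getD ks0 rv.1,
    flat_find rv.1 (fun k => decide (0 < s.getD k 0)) ks0]
  have hh := flat_head rv.1 ks0
  cases hc : ks0.filter (fun k => decide (rv.1 ∈ (PySem.Str.split? k ",").getD [])) with
  | nil =>
    rw [hc, List.head?_nil] at hh
    rw [List.head?_eq_none_iff.mp hh]
    simp
  | cons k0 rest =>
    rw [hc] at hh
    cases hf : (k0 :: rest).find? (fun k => decide (0 < s.getD k 0)) with
    | some u => simp
    | none =>
      cases hL : ks0.flatMap (fun k =>
          (((PySem.Str.split? k ",").getD []).filter (fun r => r == rv.1)).map (fun _ => k)) with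
      | nil => rw [hL] at hh; exact absurd hh (by simp)
      | cons a t =>
        rw [hL] at hh
        have ha : a = k0 := by simpa using hh
        rw [ha]
        simp

theorem foldl_steps_eq (ks0 : List String) :
    ∀ (other : List (String × Int)) (s : PySem.Dict String Int), s.keys = ks0 →
    other.foldl (pvStepA (mappedresidues ks0)) s = other.foldl pvStepB s := by
  intro other
  induction other with
  | nil => intro s _; rfl
  | cons rv rest ih =>
    intro s hk
    rw [List.foldl_cons, List.foldl_cons, step_eq ks0 s hk rv]
    exact ih (pvStepB s rv) (by rw [keys_pvStepB]; exact hk)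

-- ===== VERDICT (by name: the statement is the Claim_ definition above) =====
theorem subtract_dict_spec : Claim_equal_subtract_dict := by
  intro d other _ _
  unfold Spec_subtract_dict
  rw [subtract_dict_eq_foldl, subtract_dict_alt_eq_foldl,
    foldl_steps_eq (PySem.Dict.mk d).keys other (PySem.Dict.mk d) rfl]
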